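-- pv_equiv track=rewrite | github.com/gaoyuanzong/resoukanban | main.py | get_solar_term
-- ===== SOURCE A (Python) =====
-- def get_solar_term(year, month, day):
--     data = [
--         (1, 6, "小寒"), (1, 20, "大寒"),
--         (2, 4, "立春"), (2, 19, "雨水"),
--         (3, 6, "惊蛰"), (3, 21, "春分"),
--         (4, 5, "清明"), (4, 20, "谷雨"),
--         (5, 6, "立夏"), (5, 21, "小满"),
--         (6, 6, "芒种"), (6, 21, "夏至"),
--         (7, 7, "小暑"), (7, 23, "大暑"),
--         (8, 8, "立秋"), (8, 23, "处暑"),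
--         (9, 8, "白露"), (9, 23, "秋分"),
--         (10, 8, "寒露"), (10, 23, "霜降"),
--         (11, 7, "立冬"), (11, 22, "小雪"),
--         (12, 7, "大雪"), (12, 22, "冬至"),
--     ]
--     for m, d, name in data:
--         if m == month and d == day:
--             return name
--     for m, d, name in data:
--         if m == month and d >= day:
--             return name
--     return "立春"
-- ===== SOURCE B (Python) =====
-- _TERMS = {
--     1: ((6, "小寒"), (20, "大寒")),
--     2: ((4, "立春"), (19, "雨水")),
--     3: ((6, "惊蛰"), (21, "春分")),
--     4: ((5, "清明"), (20, "谷雨")),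
--     5: ((6, "立夏"), (21, "小满")),
--     6: ((6, "芒种"), (21, "夏至")),
--     7: ((7, "小暑"), (23, "大暑")),
--     8: ((8, "立秋"), (23, "处暑")),
--     9: ((8, "白露"), (23, "秋分")),
--     10: ((8, "寒露"), (23, "霜降")),
--     11: ((7, "立冬"), (22, "小雪")),
--     12: ((7, "大雪"), (22, "冬至")),
-- }
--
--
-- def get_solar_term(year, month, day):
--     pair = _TERMS.get(month)
--     if pair is None:
--         return "立春"
--     (d1, n1), (d2, n2) = pair
--     if day <= d1:
--         return n1
--     if day <= d2:
--         return n2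
--     return "立春"
-- ===== Notes on version B (the rewrite author's own statement) =====
-- stated objective: simpler
-- what changed: Replaced A's two sequential 24-entry scans with a dict keyed by month to its two (day,name) pairs: one O(1) month lookup followed by two day comparisons; within each month the days are ascending, so the first entry with day<=d coincides with the exact match when present, and the fall-through default stays "立春".
import Mathlib
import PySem

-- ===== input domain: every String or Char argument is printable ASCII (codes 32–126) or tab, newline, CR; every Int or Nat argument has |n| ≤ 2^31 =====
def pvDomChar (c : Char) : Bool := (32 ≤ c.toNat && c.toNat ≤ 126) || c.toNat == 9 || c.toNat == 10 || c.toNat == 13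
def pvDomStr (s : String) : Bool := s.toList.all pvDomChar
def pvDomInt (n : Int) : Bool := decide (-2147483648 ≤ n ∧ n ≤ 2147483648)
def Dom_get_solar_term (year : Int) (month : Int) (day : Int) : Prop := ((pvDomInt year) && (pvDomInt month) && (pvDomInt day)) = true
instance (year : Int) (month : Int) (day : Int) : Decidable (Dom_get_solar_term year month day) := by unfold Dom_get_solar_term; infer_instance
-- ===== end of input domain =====

-- B replaces A's two sequential scans of the 24-entry table with a dict keyed by month
-- (objective: simpler — one O(1) month lookup and two day comparisons).

-- ===== PORT A =====
def pvData : List (Int × Int × String) :=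
  [(1, 6, "小寒"), (1, 20, "大寒"),
   (2, 4, "立春"), (2, 19, "雨水"),
   (3, 6, "惊蛰"), (3, 21, "春分"),
   (4, 5, "清明"), (4, 20, "谷雨"),
   (5, 6, "立夏"), (5, 21, "小满"),
   (6, 6, "芒种"), (6, 21, "夏至"),
   (7, 7, "小暑"), (7, 23, "大暑"),
   (8, 8, "立秋"), (8, 23, "处暑"),
   (9, 8, "白露"), (9, 23, "秋分"),
   (10, 8, "寒露"), (10, 23, "霜降"),
   (11, 7, "立冬"), (11, 22, "小雪"),
   (12, 7, "大雪"), (12, 22, "冬至")]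

-- first loop: return name of the first entry with m == month and d == day
def pvFindExact : List (Int × Int × String) → Int → Int → Option String
  | [], _, _ => none
  | (m, d, name) :: rest, month, day =>
      if m = month ∧ d = day then some name else pvFindExact rest month day

-- second loop: return name of the first entry with m == month and d >= day
def pvFindGE : List (Int × Int × String) → Int → Int → Option String
  | [], _, _ => none
  | (m, d, name) :: rest, month, day =>
      if m = month ∧ d ≥ day then some name else pvFindGE rest month day

def get_solar_term (year : Int) (month : Int) (day : Int) : String :=
  match pvFindExact pvData month day with
  | some name => name
  | none =>
      match pvFindGE pvData month day with
      | some name => name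
      | none => "立春"

-- ===== PORT B =====
def pvTerms : PySem.Dict Int ((Int × String) × (Int × String)) :=
  PySem.Dict.ofList
    [(1, ((6, "小寒"), (20, "大寒"))),
     (2, ((4, "立春"), (19, "雨水"))),
     (3, ((6, "惊蛰"), (21, "春分"))),
     (4, ((5, "清明"), (20, "谷雨"))),
     (5, ((6, "立夏"), (21, "小满"))),
     (6, ((6, "芒种"), (21, "夏至"))),
     (7, ((7, "小暑"), (23, "大暑"))),
     (8, ((8, "立秋"), (23, "处暑"))),
     (9, ((8, "白露"), (23, "秋分"))),
     (10, ((8, "寒露"), (23, "霜降"))),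
     (11, ((7, "立冬"), (22, "小雪"))),
     (12, ((7, "大雪"), (22, "冬至")))]

def get_solar_term_alt (year : Int) (month : Int) (day : Int) : String :=
  match PySem.Dict.get? pvTerms month with
  | none => "立春"
  | some ((d1, n1), (d2, n2)) =>
      if day ≤ d1 then n1
      else if day ≤ d2 then n2
      else "立春"

-- ===== PRECONDITION & SPEC =====
def Spec_get_solar_term (year : Int) (month : Int) (day : Int) (out : String) : Prop := out = get_solar_term_alt year month day
instance (year : Int) (month : Int) (day : Int) (out : String) : Decidable (Spec_get_solar_term year month day out) := by unfold Spec_get_solar_term; infer_instance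

-- ===== CLAIM (what is proved, stated in full; the proofs are below) =====
def Claim_equal_get_solar_term : Prop := ∀ (year : Int) (month : Int) (day : Int), Dom_get_solar_term year month day → Spec_get_solar_term year month day (get_solar_term year month day)

-- ===== LEMMAS AND PROOFS =====

theorem pvTerms_eq : pvTerms = PySem.Dict.mk
    [(1, ((6, "小寒"), (20, "大寒"))),
     (2, ((4, "立春"), (19, "雨水"))),
     (3, ((6, "惊蛰"), (21, "春分"))),
     (4, ((5, "清明"), (20, "谷雨"))),
     (5, ((6, "立夏"), (21, "小满"))),
     (6, ((6, "芒种"), (21, "夏至"))),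
     (7, ((7, "小暑"), (23, "大暑"))),
     (8, ((8, "立秋"), (23, "处暑"))),
     (9, ((8, "白露"), (23, "秋分"))),
     (10, ((8, "寒露"), (23, "霜降"))),
     (11, ((7, "立冬"), (22, "小雪"))),
     (12, ((7, "大雪"), (22, "冬至")))] := by rfl

theorem pv_eq (year month day : Int) :
    get_solar_term year month day = get_solar_term_alt year month day := by
  by_cases h1 : month = 1
  · subst h1
    simp [get_solar_term, get_solar_term_alt, pvData, pvTerms_eq, pvFindExact, pvFindGE, PySem.Dict.get?_mk_cons, PySem.Dict.get?]
    split_ifs <;> simp_all <;> omega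
  · 
    by_cases h2 : month = 2
    · subst h2
      simp [get_solar_term, get_solar_term_alt, pvData, pvTerms_eq, pvFindExact, pvFindGE, PySem.Dict.get?_mk_cons, PySem.Dict.get?]
      split_ifs <;> simp_all <;> omega
    · 
      by_cases h3 : month = 3
      · subst h3
        simp [get_solar_term, get_solar_term_alt, pvData, pvTerms_eq, pvFindExact, pvFindGE, PySem.Dict.get?_mk_cons, PySem.Dict.get?]
        split_ifs <;> simp_all <;> omega
      · 
        by_cases h4 : month = 4
        · subst h4
          simp [get_solar_term, get_solar_term_alt, pvData, pvTerms_eq, pvFindExact, pvFindGE, PySem.Dict.get?_mk_cons, PySem.Dict.get?]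
          split_ifs <;> simp_all <;> omega
        · 
          by_cases h5 : month = 5
          · subst h5
            simp [get_solar_term, get_solar_term_alt, pvData, pvTerms_eq, pvFindExact, pvFindGE, PySem.Dict.get?_mk_cons, PySem.Dict.get?]
            split_ifs <;> simp_all <;> omega
          · 
            by_cases h6 : month = 6
            · subst h6
              simp [get_solar_term, get_solar_term_alt, pvData, pvTerms_eq, pvFindExact, pvFindGE, PySem.Dict.get?_mk_cons, PySem.Dict.get?]
              split_ifs <;> simp_all <;> omega
            · 
              by_cases h7 : month = 7
              · subst h7
                simp [get_solar_term, get_solar_term_alt, pvData, pvTerms_eq, pvFindExact, pvFindGE, PySem.Dict.get?_mk_cons, PySem.Dict.get?]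
                split_ifs <;> simp_all <;> omega
              · 
                by_cases h8 : month = 8
                · subst h8
                  simp [get_solar_term, get_solar_term_alt, pvData, pvTerms_eq, pvFindExact, pvFindGE, PySem.Dict.get?_mk_cons, PySem.Dict.get?]
                  split_ifs <;> simp_all <;> omega
                · 
                  by_cases h9 : month = 9
                  · subst h9
                    simp [get_solar_term, get_solar_term_alt, pvData, pvTerms_eq, pvFindExact, pvFindGE, PySem.Dict.get?_mk_cons, PySem.Dict.get?]
                    split_ifs <;> simp_all <;> omega
                  · 
                    by_cases h10 : month = 10
                    · subst h10
                      simp [get_solar_term, get_solar_term_alt, pvData, pvTerms_eq, pvFindExact, pvFindGE, PySem.Dict.get?_mk_cons, PySem.Dict.get?]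
                      split_ifs <;> simp_all <;> omega
                    · 
                      by_cases h11 : month = 11
                      · subst h11
                        simp [get_solar_term, get_solar_term_alt, pvData, pvTerms_eq, pvFindExact, pvFindGE, PySem.Dict.get?_mk_cons, PySem.Dict.get?]
                        split_ifs <;> simp_all <;> omega
                      · 
                        by_cases h12 : month = 12
                        · subst h12
                          simp [get_solar_term, get_solar_term_alt, pvData, pvTerms_eq, pvFindExact, pvFindGE, PySem.Dict.get?_mk_cons, PySem.Dict.get?]
                          split_ifs <;> simp_all <;> omega
                        · 
                          simp [get_solar_term, get_solar_term_alt, pvData, pvTerms_eq, pvFindExact, pvFindGE, PySem.Dict.get?_mk_cons, PySem.Dict.get?, Ne.symm h1, Ne.symm h2, Ne.symm h3, Ne.symm h4, Ne.symm h5, Ne.symm h6, Ne.symm h7, Ne.symm h8, Ne.symm h9, Ne.symm h10, Ne.symm h11, Ne.symm h12]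

-- ===== VERDICT (by name: the statement is the Claim_ definition above) =====
theorem get_solar_term_spec : Claim_equal_get_solar_term := by
  intro year month day _
  unfold Spec_get_solar_term
  exact pv_eq year month day
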